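-- pv_equiv track=rewrite | github.com/camachoyury/AutonomousAuditor | auditor/utils/formatters.py | format_audit_summary
-- ===== SOURCE A (Python) =====
-- from typing import Dict, List
--
-- def format_audit_summary(discrepancies: List[Dict]) -> str:
--     """Formatea un resumen de la auditoría."""
--     high_severity = [d for d in discrepancies if d['severity'] == 'high']
--     medium_severity = [d for d in discrepancies if d['severity'] == 'medium']
--     low_severity = [d for d in discrepancies if d['severity'] == 'low']
--
--     return f"""
--     Resumen de Auditoría:
--     - Total de discrepancias: {len(discrepancies)}
--     - Severidad Alta: {len(high_severity)}
--     - Severidad Media: {len(medium_severity)}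
--     - Severidad Baja: {len(low_severity)}
--     """
-- ===== SOURCE B (Python) =====
-- def format_audit_summary(discrepancies):
--     """Formatea un resumen de la auditoría."""
--     counts = {}
--     for d in discrepancies:
--         s = d['severity']
--         counts[s] = counts.get(s, 0) + 1
--     return f"""
--     Resumen de Auditoría:
--     - Total de discrepancias: {len(discrepancies)}
--     - Severidad Alta: {counts.get('high', 0)}
--     - Severidad Media: {counts.get('medium', 0)}
--     - Severidad Baja: {counts.get('low', 0)}
--     """
-- ===== Notes on version B (the rewrite author's own statement) =====
-- stated objective: idiomatic
-- what changed: Replaces the three filtered list comprehensions (three scans) with a single pass that builds a severity-count dictionary and formats the summary from counts.get('high'/'medium'/'low', 0).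
import Mathlib
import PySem

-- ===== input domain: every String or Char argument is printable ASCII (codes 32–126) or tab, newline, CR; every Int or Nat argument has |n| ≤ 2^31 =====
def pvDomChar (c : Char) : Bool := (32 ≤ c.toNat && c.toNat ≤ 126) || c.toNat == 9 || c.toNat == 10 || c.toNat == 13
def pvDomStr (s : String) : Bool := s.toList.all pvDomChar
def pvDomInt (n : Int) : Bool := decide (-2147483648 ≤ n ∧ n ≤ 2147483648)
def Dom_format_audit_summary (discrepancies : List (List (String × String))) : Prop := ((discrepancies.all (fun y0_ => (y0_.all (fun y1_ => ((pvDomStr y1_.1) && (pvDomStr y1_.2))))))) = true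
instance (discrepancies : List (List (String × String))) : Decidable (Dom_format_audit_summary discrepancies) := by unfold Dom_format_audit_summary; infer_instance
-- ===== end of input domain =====

-- B replaces A's three filtering passes by one pass building a severity-count dictionary; same output.

-- ===== PORT A =====
-- d['severity'] is (Dict.mk d).get? "severity"; Pre_ guarantees the key exists (else Python raises KeyError).
def format_audit_summary (discrepancies : List (List (String × String))) : String :=
  let high_severity := discrepancies.filter (fun d => (PySem.Dict.mk d).get? "severity" == some "high")
  let medium_severity := discrepancies.filter (fun d => (PySem.Dict.mk d).get? "severity" == some "medium")
  let low_severity := discrepancies.filter (fun d => (PySem.Dict.mk d).get? "severity" == some "low")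
  "\n    Resumen de Auditoría:\n    - Total de discrepancias: " ++ PySem.Int.toStr (discrepancies.length : Int) ++
  "\n    - Severidad Alta: " ++ PySem.Int.toStr (high_severity.length : Int) ++
  "\n    - Severidad Media: " ++ PySem.Int.toStr (medium_severity.length : Int) ++
  "\n    - Severidad Baja: " ++ PySem.Int.toStr (low_severity.length : Int) ++ "\n    "

-- ===== PORT B =====
-- counts[s] = counts.get(s, 0) + 1 in one pass; s = d['severity'] (exists under Pre_).
def format_audit_summary_alt (discrepancies : List (List (String × String))) : String :=
  let counts : PySem.Dict String Int :=
    discrepancies.foldl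
      (fun c d =>
        let s := ((PySem.Dict.mk d).get? "severity").getD ""
        c.insert s (c.getD s 0 + 1))
      PySem.Dict.empty
  "\n    Resumen de Auditoría:\n    - Total de discrepancias: " ++ PySem.Int.toStr (discrepancies.length : Int) ++
  "\n    - Severidad Alta: " ++ PySem.Int.toStr (counts.getD "high" 0) ++
  "\n    - Severidad Media: " ++ PySem.Int.toStr (counts.getD "medium" 0) ++
  "\n    - Severidad Baja: " ++ PySem.Int.toStr (counts.getD "low" 0) ++ "\n    "

-- ===== PRECONDITION & SPEC =====
-- Pre_ excludes exactly the inputs where Python A raises KeyError: some dict lacks the 'severity' key.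
def Pre_format_audit_summary (discrepancies : List (List (String × String))) : Prop :=
  ∀ d ∈ discrepancies, (PySem.Dict.mk d).contains "severity" = true
instance (discrepancies : List (List (String × String))) : Decidable (Pre_format_audit_summary discrepancies) := by unfold Pre_format_audit_summary; infer_instance
def pvWitness_format_audit_summary : (List (List (String × String))) := [[("severity", "high")], [("severity", "low")]]
def Spec_format_audit_summary (discrepancies : List (List (String × String))) (out : String) : Prop := out = format_audit_summary_alt discrepancies
instance (discrepancies : List (List (String × String))) (out : String) : Decidable (Spec_format_audit_summary discrepancies out) := by unfold Spec_format_audit_summary; infer_instance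

-- ===== CLAIM (what is proved, stated in full; the proofs are below) =====
def Claim_equal_format_audit_summary : Prop := ∀ (discrepancies : List (List (String × String))), Dom_format_audit_summary discrepancies → Pre_format_audit_summary discrepancies → Spec_format_audit_summary discrepancies (format_audit_summary discrepancies)

-- ===== LEMMAS AND PROOFS =====

-- B's fold is Counter over the extracted severities.
theorem counts_eq_counter (discrepancies : List (List (String × String))) :
    discrepancies.foldl
      (fun (c : PySem.Dict String Int) d =>
        let s := ((PySem.Dict.mk d).get? "severity").getD ""
        c.insert s (c.getD s 0 + 1))
      PySem.Dict.empty
    = PySem.Dict.counter (discrepancies.map (fun d => ((PySem.Dict.mk d).get? "severity").getD "")) := by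
  rw [← PySem.Dict.foldl_insert_getD_add_one_eq_counter, List.foldl_map]

-- The counter entry for a nonempty key v equals the length of A's filter for some v.
theorem count_map_eq_filter (discrepancies : List (List (String × String))) (v : String) (hv : v ≠ "") :
    (discrepancies.map (fun d => ((PySem.Dict.mk d).get? "severity").getD "")).count v
    = (discrepancies.filter (fun d => (PySem.Dict.mk d).get? "severity" == some v)).length := by
  induction discrepancies with
  | nil => rfl
  | cons d rest ih =>
    simp only [List.map_cons, List.count_cons, List.filter_cons]
    rcases h : (PySem.Dict.mk d).get? "severity" with _ | x
    · have : ("" == v) = false := by simp [Ne.symm hv]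
      simp [h, this, ih]
    · by_cases hx : x = v
      · simp [hx, ih]
      · have : (some x == some v) = false := by simp [hx]
        simp [hx, this, ih]

-- ===== VERDICT (by name: the statement is the Claim_ definition above) =====
theorem format_audit_summary_spec : Claim_equal_format_audit_summary := by
  intro discrepancies _ _
  unfold Spec_format_audit_summary format_audit_summary format_audit_summary_alt
  rw [counts_eq_counter]
  simp only [PySem.Dict.getD_counter,
    count_map_eq_filter discrepancies "high" (by decide),
    count_map_eq_filter discrepancies "medium" (by decide),
    count_map_eq_filter discrepancies "low" (by decide)]
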